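-- pv_equiv track=rewrite | github.com/Feargal-Browne/database-generation | pipeline/graph_rag.py | _assemble_path_evidence
-- ===== SOURCE A (Python) =====
-- from typing import List, Dict
--
-- def _assemble_path_evidence(
--
--     path: List[str],
--     doc_text: str,
--     graph: dict,
-- ) -> str:
--     """Reorder evidence text to prioritize content related to the agent's path."""
--     if not path:
--         return doc_text
--
--     paragraphs = [p.strip() for p in doc_text.split("\n\n") if p.strip()]
--     if not paragraphs:
--         return doc_text
--
--     path_lower = {entity.lower() for entity in path}
--
--     def relevance_score(paragraph: str) -> int:
--         text_lower = paragraph.lower()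
--         return sum(1 for entity in path_lower if entity in text_lower)
--
--     scored = [(p, relevance_score(p)) for p in paragraphs]
--     scored.sort(key=lambda x: x[1], reverse=True)
--
--     # Put path-relevant paragraphs first, then the rest
--     relevant = [p for p, s in scored if s > 0]
--     rest = [p for p, s in scored if s == 0]
--
--     return "\n\n".join(relevant + rest)
-- ===== SOURCE B (Python) =====
-- def _assemble_path_evidence(path, doc_text, graph):
--     """Bucket paragraphs by relevance score instead of sorting; emit buckets high-to-low."""
--     if not path:
--         return doc_text
--
--     paragraphs = [p.strip() for p in doc_text.split("\n\n") if p.strip()]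
--     if not paragraphs:
--         return doc_text
--
--     path_lower = {entity.lower() for entity in path}
--     n = len(path_lower)
--
--     buckets = [[] for _ in range(n + 1)]
--     for p in paragraphs:
--         text_lower = p.lower()
--         score = sum(1 for entity in path_lower if entity in text_lower)
--         buckets[score].append(p)
--
--     ordered = []
--     for bucket in reversed(buckets):
--         ordered.extend(bucket)
--     return "\n\n".join(ordered)
-- ===== Notes on version B (the rewrite author's own statement) =====
-- stated objective: alternative
-- what changed: Replaces A's stable sort of (paragraph, score) pairs plus the positive/zero partition by a single bucketing pass (append each paragraph to buckets[score]) followed by one high-to-low sweep concatenating the buckets.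
import Mathlib
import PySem

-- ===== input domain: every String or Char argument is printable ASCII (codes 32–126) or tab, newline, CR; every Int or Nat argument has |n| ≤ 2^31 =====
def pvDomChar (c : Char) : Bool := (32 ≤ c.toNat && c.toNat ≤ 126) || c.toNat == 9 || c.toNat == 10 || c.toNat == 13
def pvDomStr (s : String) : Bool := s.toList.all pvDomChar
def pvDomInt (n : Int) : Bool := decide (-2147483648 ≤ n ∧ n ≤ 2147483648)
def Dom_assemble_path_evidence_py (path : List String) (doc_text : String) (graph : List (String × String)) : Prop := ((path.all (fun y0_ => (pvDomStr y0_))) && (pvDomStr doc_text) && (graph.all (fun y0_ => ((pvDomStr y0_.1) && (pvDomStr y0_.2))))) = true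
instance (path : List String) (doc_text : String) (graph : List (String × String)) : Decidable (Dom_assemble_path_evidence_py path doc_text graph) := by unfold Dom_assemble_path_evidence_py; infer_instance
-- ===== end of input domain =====

-- B replaces A's stable sort of (paragraph, score) pairs by one bucketing pass over the paragraphs
-- plus a high-to-low sweep over the buckets (objective: alternative decomposition, same observable result).

-- relevance_score: sum(1 for entity in path_lower if entity in text_lower).
-- The 0/1-sum over the set path_lower is order-independent, so folding the PySem.Set's
-- distinct-element list in insertion order is exact. (Both Pythons contain this same expression.)
def pvScore (path_lower : PySem.Set String) (paragraph : String) : Int :=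
  let text_lower := PySem.Str.lower paragraph
  (path_lower.map (fun entity => if PySem.Str.isIn entity text_lower then (1 : Int) else 0)).sum

-- [p.strip() for p in doc_text.split("\n\n") if p.strip()]: strip each piece, keep the nonempty results.
-- sep = "\n\n" is a nonempty literal, so PySem.Str.split? is always `some`; `.getD []` is exact.
def pvParagraphs (doc_text : String) : List String :=
  (((PySem.Str.split? doc_text "\n\n").getD []).map PySem.Str.strip).filter (fun p => p ≠ "")

-- ===== PORT A =====
def assemble_path_evidence_py (path : List String) (doc_text : String) (graph : List (String × String)) : String :=
  if path = [] then doc_text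
  else
    let paragraphs := pvParagraphs doc_text
    if paragraphs = [] then doc_text
    else
      let path_lower : PySem.Set String := PySem.Set.ofList (path.map PySem.Str.lower)
      let scored := paragraphs.map (fun p => (p, pvScore path_lower p))
      let scoredSorted := PySem.List.sorted scored (fun x => x.2) true
      let relevant := (scoredSorted.filter (fun x => decide (0 < x.2))).map (fun x => x.1)
      let rest := (scoredSorted.filter (fun x => decide (x.2 = 0))).map (fun x => x.1)
      PySem.Str.join "\n\n" (relevant ++ rest)

-- ===== PORT B =====
-- buckets[score].append(p): score = pvScore ∈ [0, n] (a 0/1-sum over n elements), so Python's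
-- buckets[score] never goes out of range and List.set/getD at score.toNat is exact.
def assemble_path_evidence_py_alt (path : List String) (doc_text : String) (graph : List (String × String)) : String :=
  if path = [] then doc_text
  else
    let paragraphs := pvParagraphs doc_text
    if paragraphs = [] then doc_text
    else
      let path_lower : PySem.Set String := PySem.Set.ofList (path.map PySem.Str.lower)
      let n := path_lower.length
      let buckets := paragraphs.foldl
        (fun bs p =>
          let score := pvScore path_lower p
          bs.set score.toNat (bs.getD score.toNat [] ++ [p]))
        (List.replicate (n + 1) ([] : List String))
      let ordered := buckets.reverse.foldl (fun acc bucket => acc ++ bucket) ([] : List String)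
      PySem.Str.join "\n\n" ordered

-- ===== PRECONDITION & SPEC =====
def Spec_assemble_path_evidence_py (path : List String) (doc_text : String) (graph : List (String × String)) (out : String) : Prop := out = assemble_path_evidence_py_alt path doc_text graph
instance (path : List String) (doc_text : String) (graph : List (String × String)) (out : String) : Decidable (Spec_assemble_path_evidence_py path doc_text graph out) := by unfold Spec_assemble_path_evidence_py; infer_instance

-- ===== CLAIM (what is proved, stated in full; the proofs are below) =====
def Claim_equal_assemble_path_evidence_py : Prop := ∀ (path : List String) (doc_text : String) (graph : List (String × String)), Dom_assemble_path_evidence_py path doc_text graph → Spec_assemble_path_evidence_py path doc_text graph (assemble_path_evidence_py path doc_text graph)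

-- ===== LEMMAS AND PROOFS =====

-- insertBy passes over a block none of whose elements should come after x.
theorem pv_insertBy_append {α : Type} (before : α → α → Bool) (x : α) (as bs : List α)
    (h : ∀ y ∈ as, before x y = false) :
    PySem.List.insertBy before x (as ++ bs) = as ++ PySem.List.insertBy before x bs := by
  induction as with
  | nil => simp
  | cons a as ih =>
    simp only [List.cons_append, PySem.List.insertBy]
    rw [h a (by simp)]
    simp only [Bool.false_eq_true, if_false, List.cons.injEq, true_and]
    exact ih (fun y hy => h y (by simp [hy]))

-- insertBy puts x in front when every element should come after it.
theorem pv_insertBy_front {α : Type} (before : α → α → Bool) (x : α) (bs : List α)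
    (h : ∀ y ∈ bs, before x y = true) :
    PySem.List.insertBy before x bs = x :: bs := by
  cases bs with
  | nil => rfl
  | cons b bs => simp [PySem.List.insertBy, h b (by simp)]

-- Inserting x into a list grouped by strictly descending key values appends x to its own group.
theorem pv_insertBy_flatMap {α : Type} (key : α → Int) (x : α) (L : List Int) (G : Int → List α)
    (hL : L.Pairwise (fun a b => b < a)) (hx : key x ∈ L)
    (hG : ∀ s ∈ L, ∀ y ∈ G s, key y = s) :
    PySem.List.insertBy (fun a b => decide (key b < key a)) x (L.flatMap G)
      = L.flatMap (fun s => if s = key x then G s ++ [x] else G s) := by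
  induction L with
  | nil => cases hx
  | cons s L ih =>
    have hhead : ∀ b ∈ L, b < s := fun b hb => (List.pairwise_cons.mp hL).1 b hb
    simp only [List.flatMap_cons]
    rcases List.mem_cons.mp hx with hxs | hxL
    · -- key x = s : skip G s, insert in front of the (strictly smaller) tail groups
      have hGs : ∀ y ∈ G s, (decide (key y < key x) : Bool) = false := by
        intro y hy
        have hks : key y = s := hG s (by simp) y hy
        simp [hks, ← hxs]
      have htail : ∀ y ∈ L.flatMap G, (decide (key y < key x) : Bool) = true := by
        intro y hy
        rcases List.mem_flatMap.mp hy with ⟨t, htL, hyt⟩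
        have hkt : key y = t := hG t (by simp [htL]) y hyt
        have := hhead t htL
        simp [hkt]
        omega
      rw [pv_insertBy_append _ _ _ _ hGs, pv_insertBy_front _ _ _ htail, if_pos hxs.symm]
      have hrest : (L.flatMap fun t => if t = key x then G t ++ [x] else G t) = L.flatMap G := by
        apply List.flatMap_congr
        intro t htL
        have h1 := hhead t htL
        have h2 : t ≠ key x := by omega
        simp [h2]
      rw [hrest]
      simp
    · -- key x in the tail groups: skip G s, recurse
      have hlt : key x < s := hhead _ hxL
      have hGs : ∀ y ∈ G s, (decide (key y < key x) : Bool) = false := by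
        intro y hy
        have hks : key y = s := hG s (by simp) y hy
        simp [hks]; omega
      rw [pv_insertBy_append _ _ _ _ hGs,
        ih (List.pairwise_cons.mp hL).2 hxL (fun t ht y hy => hG t (by simp [ht]) y hy),
        if_neg (by omega)]

-- A stable descending sort by an [0,n]-valued key is the concatenation, for s = n down to 0,
-- of the original-order groups with key s.
theorem pv_sorted_eq_flatMap {α : Type} (key : α → Int) (P : List α) (n : Nat)
    (h : ∀ p ∈ P, 0 ≤ key p ∧ key p ≤ (n : Int)) :
    PySem.List.sorted P key true
      = (((List.range (n + 1)).reverse).map (fun (s : Nat) => (s : Int))).flatMap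
          (fun s => P.filter (fun p => decide (key p = s))) := by
  rw [PySem.List.sorted_rev_eq_foldl_insertBy]
  revert h
  induction P using List.reverseRecOn with
  | nil =>
    intro h
    simp
  | append_singleton P x ih =>
    intro h
    have hP : ∀ p ∈ P, 0 ≤ key p ∧ key p ≤ (n : Int) := fun p hp => h p (by simp [hp])
    have hx : 0 ≤ key x ∧ key x ≤ (n : Int) := h x (by simp)
    rw [List.foldl_append, List.foldl_cons, List.foldl_nil, ih hP]
    have hL : (((List.range (n + 1)).reverse).map (fun (s : Nat) => (s : Int))).Pairwise
        (fun a b => b < a) := by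
      rw [List.pairwise_map, List.pairwise_reverse]
      exact List.pairwise_lt_range.imp (fun hab => by exact_mod_cast hab)
    have hkx : key x ∈ ((List.range (n + 1)).reverse).map (fun (s : Nat) => (s : Int)) := by
      rw [List.mem_map]
      refine ⟨(key x).toNat, ?_, by omega⟩
      rw [List.mem_reverse, List.mem_range]
      omega
    rw [pv_insertBy_flatMap key x _ _ hL hkx
      (fun s hs y hy => by exact of_decide_eq_true (List.mem_filter.mp hy).2)]
    apply List.flatMap_congr
    intro s hs
    rw [List.filter_append]
    by_cases hsx : s = key x
    · rw [if_pos hsx]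
      have : List.filter (fun p => decide (key p = s)) [x] = [x] := by
        simp [hsx]
      rw [this]
    · rw [if_neg hsx]
      have : List.filter (fun p => decide (key p = s)) [x] = [] := by
        simp; omega
      rw [this, List.append_nil]

-- insertBy commutes with mapping, given the comparator commutes.
theorem pv_insertBy_map {α β : Type} (f : α → β) (bf : α → α → Bool) (bf' : β → β → Bool)
    (hc : ∀ a b, bf' (f a) (f b) = bf a b) (x : α) (ys : List α) :
    PySem.List.insertBy bf' (f x) (ys.map f) = (PySem.List.insertBy bf x ys).map f := by
  induction ys with
  | nil => rfl
  | cons y ys ih =>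
    simp only [List.map_cons, PySem.List.insertBy, hc]
    by_cases hb : bf x y = true
    · simp [hb]
    · simp only [Bool.not_eq_true] at hb
      simp [hb, ih]

-- sorting the (p, key p) pairs by second component is sorting the p's and then pairing.
theorem pv_sorted_map_pair {α : Type} (key : α → Int) (P : List α) :
    PySem.List.sorted (P.map (fun p => (p, key p))) (fun x => x.2) true
      = (PySem.List.sorted P key true).map (fun p => (p, key p)) := by
  rw [PySem.List.sorted_rev_eq_foldl_insertBy, PySem.List.sorted_rev_eq_foldl_insertBy]
  suffices hgen : ∀ acc : List α,
      List.foldl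
          (fun acc x => PySem.List.insertBy (fun a b => decide (b.2 < a.2)) x acc)
          (acc.map (fun p => (p, key p))) (P.map (fun p => (p, key p)))
        = (List.foldl (fun acc x => PySem.List.insertBy (fun a b => decide (key b < key a)) x acc)
            acc P).map (fun p => (p, key p)) by
    simpa using hgen []
  induction P with
  | nil => intro acc; rfl
  | cons p P ih =>
    intro acc
    simp only [List.map_cons, List.foldl_cons]
    rw [pv_insertBy_map (fun p => (p, key p))
      (fun a b => decide (key b < key a)) (fun a b => decide (b.2 < a.2)) (fun a b => rfl) p acc]
    exact ih _

-- the bucket fold computes, at index s, the original-order group with key s.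
theorem pv_buckets {α : Type} (key : α → Int) (P : List α) (n : Nat)
    (h : ∀ p ∈ P, 0 ≤ key p ∧ key p ≤ (n : Int)) :
    P.foldl (fun bs p => bs.set (key p).toNat (bs.getD (key p).toNat [] ++ [p]))
        (List.replicate (n + 1) ([] : List α))
      = (List.range (n + 1)).map (fun (s : Nat) => P.filter (fun p => decide (key p = (s : Int)))) := by
  revert h
  induction P using List.reverseRecOn with
  | nil =>
    intro h
    apply List.ext_getElem
    · simp
    · intro i h1 h2
      simp
  | append_singleton P x ih =>
    intro h
    have hP : ∀ p ∈ P, 0 ≤ key p ∧ key p ≤ (n : Int) := fun p hp => h p (by simp [hp])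
    have hx : 0 ≤ key x ∧ key x ≤ (n : Int) := h x (by simp)
    have hk : (key x).toNat < n + 1 := by omega
    rw [List.foldl_append, List.foldl_cons, List.foldl_nil, ih hP]
    have hgetD : ((List.range (n + 1)).map
          (fun (s : Nat) => P.filter (fun p => decide (key p = (s : Int))))).getD (key x).toNat []
        = P.filter (fun p => decide (key p = ((key x).toNat : Int))) := by
      rw [List.getD_eq_getElem _ _ (by simpa using hk)]
      simp only [List.getElem_map, List.getElem_range]
    rw [hgetD]
    apply List.ext_getElem
    · simp
    · intro i h1 h2
      rw [List.getElem_set]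
      simp only [List.getElem_map, List.getElem_range, List.filter_append]
      simp only [List.length_set, List.length_map, List.length_range] at h1
      by_cases hi : (key x).toNat = i
      · rw [if_pos hi]
        have hfx : List.filter (fun p => decide (key p = (i : Int))) [x] = [x] := by
          simp; omega
        rw [hfx, ← hi]
      · rw [if_neg hi]
        have hfx : List.filter (fun p => decide (key p = (i : Int))) [x] = [] := by
          simp; omega
        rw [hfx, List.append_nil]

-- the score is a count of distinct path entities, hence lies in [0, |path_lower|].
theorem pv_score_bounds (pl : PySem.Set String) (p : String) :
    0 ≤ pvScore pl p ∧ pvScore pl p ≤ (pl.length : Int) := by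
  have hc : pvScore pl p
      = ((List.countP (fun entity => PySem.Str.isIn entity (PySem.Str.lower p)) pl : Nat) : Int) := by
    simp [pvScore, PySem.List.sum_map_ite_one_zero]
  constructor
  · rw [hc]; positivity
  · rw [hc]
    exact_mod_cast List.countP_le_length

-- A's relevant ++ rest is exactly the descending-stable-sorted paragraph list.
theorem pv_A_list (pl : PySem.Set String) (P : List String) :
    ((PySem.List.sorted (P.map (fun p => (p, pvScore pl p))) (fun x => x.2) true).filter
        (fun x => decide (0 < x.2))).map (fun x => x.1)
      ++ ((PySem.List.sorted (P.map (fun p => (p, pvScore pl p))) (fun x => x.2) true).filter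
        (fun x => decide (x.2 = 0))).map (fun x => x.1)
      = PySem.List.sorted P (pvScore pl) true := by
  set key := pvScore pl with hkey
  set n := pl.length with hn
  rw [pv_sorted_map_pair key P]
  simp only [List.filter_map, List.map_map]
  dsimp only [Function.comp_def]
  simp only [List.map_id']
  have hS := pv_sorted_eq_flatMap key P n (fun p _ => pv_score_bounds pl p)
  rw [hS]
  -- split the descending score list as positives ++ [0]
  rw [List.range_succ_eq_map, List.reverse_cons, List.map_append, List.flatMap_append]
  simp only [List.map_cons, List.map_nil, List.flatMap_cons, List.flatMap_nil,
    Nat.cast_zero, List.append_nil]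
  rw [List.filter_append, List.filter_append]
  have hpos : List.filter (fun p => decide (0 < key p))
      ((((List.range n).map Nat.succ).reverse.map (fun (s : Nat) => (s : Int))).flatMap
        (fun s => P.filter (fun p => decide (key p = s))))
      = (((List.range n).map Nat.succ).reverse.map (fun (s : Nat) => (s : Int))).flatMap
        (fun s => P.filter (fun p => decide (key p = s))) := by
    rw [List.filter_eq_self]
    intro y hy
    rcases List.mem_flatMap.mp hy with ⟨s, hsL, hys⟩
    rcases List.mem_map.mp hsL with ⟨m, hm, rfl⟩
    rcases List.mem_reverse.mp hm |> List.mem_map.mp with ⟨j, hj, rfl⟩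
    have : key y = ((Nat.succ j : Nat) : Int) := of_decide_eq_true (List.mem_filter.mp hys).2
    simp; omega
  have hpos0 : List.filter (fun p => decide (0 < key p))
      (P.filter (fun p => decide (key p = 0))) = [] := by
    rw [List.filter_eq_nil_iff]
    intro y hy
    have : key y = 0 := of_decide_eq_true (List.mem_filter.mp hy).2
    simp; omega
  have hzer : List.filter (fun p => decide (key p = 0))
      ((((List.range n).map Nat.succ).reverse.map (fun (s : Nat) => (s : Int))).flatMap
        (fun s => P.filter (fun p => decide (key p = s))))
      = [] := by
    rw [List.filter_eq_nil_iff]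
    intro y hy
    rcases List.mem_flatMap.mp hy with ⟨s, hsL, hys⟩
    rcases List.mem_map.mp hsL with ⟨m, hm, rfl⟩
    rcases List.mem_reverse.mp hm |> List.mem_map.mp with ⟨j, hj, rfl⟩
    have : key y = ((Nat.succ j : Nat) : Int) := of_decide_eq_true (List.mem_filter.mp hys).2
    simp; omega
  have hzer0 : List.filter (fun p => decide (key p = 0))
      (P.filter (fun p => decide (key p = 0))) = P.filter (fun p => decide (key p = 0)) := by
    rw [List.filter_eq_self]
    intro y hy
    exact (List.mem_filter.mp hy).2
  rw [hpos, hpos0, hzer, hzer0, List.append_nil]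
  rw [List.nil_append]

-- B's reversed-bucket sweep is also the descending-stable-sorted paragraph list.
theorem pv_B_list (pl : PySem.Set String) (P : List String) :
    ((P.foldl
        (fun bs p =>
          bs.set (pvScore pl p).toNat (bs.getD (pvScore pl p).toNat [] ++ [p]))
        (List.replicate (pl.length + 1) ([] : List String))).reverse).foldl
        (fun acc bucket => acc ++ bucket) ([] : List String)
      = PySem.List.sorted P (pvScore pl) true := by
  set key := pvScore pl with hkey
  set n := pl.length with hn
  rw [pv_buckets key P n (fun p _ => pv_score_bounds pl p)]
  rw [← List.map_reverse]
  rw [PySem.List.foldl_append_eq_flatMap (fun bucket => bucket)]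
  rw [List.flatMap_map, List.nil_append]
  rw [pv_sorted_eq_flatMap key P n (fun p _ => pv_score_bounds pl p)]
  rw [List.flatMap_map]

-- ===== VERDICT (by name: the statement is the Claim_ definition above) =====
theorem assemble_path_evidence_py_spec : Claim_equal_assemble_path_evidence_py := by
  intro path doc_text graph _
  unfold Spec_assemble_path_evidence_py
  unfold assemble_path_evidence_py assemble_path_evidence_py_alt
  dsimp only
  by_cases hp : path = []
  · rw [if_pos hp, if_pos hp]
  · rw [if_neg hp, if_neg hp]
    by_cases hq : pvParagraphs doc_text = []
    · rw [if_pos hq, if_pos hq]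
    · rw [if_neg hq, if_neg hq]
      exact congrArg (PySem.Str.join "\n\n") (by rw [pv_A_list, pv_B_list])
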